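-- pv_equiv track=rewrite | github.com/adutev/Programming-0 | week7/sands_of_time.py | print_sands_clock
-- ===== SOURCE A (Python) =====
-- def print_sands_clock(n):
-- 	middle = n//2
-- 	result = ""
-- 	for row in range(0, n):
-- 		for col in range(0, n):
-- 			if row == 0 or row == n - 1:
-- 				result += '*'
-- 			elif(col >= row and col < n - row and row <= middle):
-- 				result += '*'
-- 			elif(col >= n - row - 1 and col <= row and row > middle):
-- 				result += '*'
-- 			else:
-- 				result += '.'
-- 		result += '\n'
-- 	return result
-- ===== SOURCE B (Python) =====
-- def print_sands_clock(n):
--     lines = []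
--     for row in range(n):
--         if row == 0 or row == n - 1:
--             lines.append('*' * n)
--         elif row <= n // 2:
--             lo, hi = row, n - row - 1
--             lines.append('.' * lo + '*' * max(0, hi - lo + 1) + '.' * (n - 1 - hi))
--         else:
--             lo, hi = n - row - 1, row
--             lines.append('.' * lo + '*' * (hi - lo + 1) + '.' * (n - 1 - hi))
--     return ''.join(line + '\n' for line in lines)
-- ===== Notes on version B (the rewrite author's own statement) =====
-- stated objective: faster
-- what changed: B loops only over rows, computing each star band's boundaries arithmetically and building the line from three repeated-character segments joined at the end, instead of A's nested per-cell loop with branch tests and character-by-character string concatenation.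
import Mathlib
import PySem

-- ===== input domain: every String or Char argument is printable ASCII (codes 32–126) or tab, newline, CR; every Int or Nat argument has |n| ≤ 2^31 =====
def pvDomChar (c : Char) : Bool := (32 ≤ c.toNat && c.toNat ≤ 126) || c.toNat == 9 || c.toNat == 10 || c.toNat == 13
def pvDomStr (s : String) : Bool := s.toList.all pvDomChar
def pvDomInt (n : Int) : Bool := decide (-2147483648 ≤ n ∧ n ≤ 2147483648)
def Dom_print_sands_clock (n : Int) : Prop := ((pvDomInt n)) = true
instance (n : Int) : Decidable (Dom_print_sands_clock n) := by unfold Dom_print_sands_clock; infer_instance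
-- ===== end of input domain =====

-- B replaces A's nested per-cell loop by a row-only loop with arithmetic band boundaries (alternative decomposition; return values proved equal).

-- ===== PORT A =====
-- strings are accumulated as List Char (PySem convention) and packed with String.ofList at the end
def print_sands_clock (n : Int) : String :=
  String.ofList
    ((PySem.List.pyRange 0 n 1).foldl (fun result row =>
      ((PySem.List.pyRange 0 n 1).foldl (fun result col =>
        if row = 0 ∨ row = n - 1 then result ++ ['*']
        else if col ≥ row ∧ col < n - row ∧ row ≤ PySem.Int.floordiv n 2 then result ++ ['*']
        else if col ≥ n - row - 1 ∧ col ≤ row ∧ row > PySem.Int.floordiv n 2 then result ++ ['*']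
        else result ++ ['.']) result) ++ ['\n']) [])

-- ===== PORT B =====
def print_sands_clock_alt (n : Int) : String :=
  String.ofList
    ((((PySem.List.pyRange 0 n 1).foldl (fun lines row =>
      if row = 0 ∨ row = n - 1 then
        lines ++ [PySem.List.pyRepeat ['*'] n]
      else if row ≤ PySem.Int.floordiv n 2 then
        lines ++ [PySem.List.pyRepeat ['.'] row ++ PySem.List.pyRepeat ['*'] (max 0 ((n - row - 1) - row + 1)) ++ PySem.List.pyRepeat ['.'] (n - 1 - (n - row - 1))]
      else
        lines ++ [PySem.List.pyRepeat ['.'] (n - row - 1) ++ PySem.List.pyRepeat ['*'] (row - (n - row - 1) + 1) ++ PySem.List.pyRepeat ['.'] (n - 1 - row)]) []).map (fun l => l ++ ['\n'])).flatten)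

-- ===== PRECONDITION & SPEC =====
def Spec_print_sands_clock (n : Int) (out : String) : Prop := out = print_sands_clock_alt n
instance (n : Int) (out : String) : Decidable (Spec_print_sands_clock n out) := by unfold Spec_print_sands_clock; infer_instance

-- ===== CLAIM (what is proved, stated in full; the proofs are below) =====
def Claim_equal_print_sands_clock : Prop := ∀ (n : Int), Dom_print_sands_clock n → Spec_print_sands_clock n (print_sands_clock n)

-- ===== LEMMAS AND PROOFS =====

-- A's per-cell character
def pvCellA (n middle row col : Int) : Char :=
  if row = 0 ∨ row = n - 1 then '*'
  else if col ≥ row ∧ col < n - row ∧ row ≤ middle then '*'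
  else if col ≥ n - row - 1 ∧ col ≤ row ∧ row > middle then '*'
  else '.'

lemma pv_foldl_append_flat {α β : Type} (f : α → List β) (l : List α) (res : List β) :
    l.foldl (fun acc x => acc ++ f x) res = res ++ l.flatMap f := by
  induction l generalizing res with
  | nil => simp
  | cons x xs ih => simp [List.foldl_cons, ih]

lemma pv_foldl_append_map {α β : Type} (f : α → β) (l : List α) (res : List β) :
    l.foldl (fun acc x => acc ++ [f x]) res = res ++ l.map f := by
  induction l generalizing res with
  | nil => simp
  | cons x xs ih => simp [List.foldl_cons, ih]

-- the band shape: dots, stars, dots, as a map over indices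
lemma pv_band (a b c : Nat) :
    (List.range (a + b + c)).map (fun k => if a ≤ k ∧ k < a + b then '*' else '.')
      = List.replicate a '.' ++ List.replicate b '*' ++ List.replicate c '.' := by
  apply List.ext_getElem
  · simp; omega
  · intro i h1 h2
    simp only [List.getElem_map, List.getElem_range, List.getElem_append,
      List.length_replicate, List.length_append, List.getElem_replicate]
    split_ifs <;> simp_all <;> omega

-- the line B builds for a given row equals A's per-cell map over that row
lemma pv_row (n row : Int) (h0 : 0 ≤ row) (hn : row < n) :
    (if row = 0 ∨ row = n - 1 then
        PySem.List.pyRepeat ['*'] n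
      else if row ≤ PySem.Int.floordiv n 2 then
        PySem.List.pyRepeat ['.'] row ++ PySem.List.pyRepeat ['*'] (max 0 ((n - row - 1) - row + 1)) ++ PySem.List.pyRepeat ['.'] (n - 1 - (n - row - 1))
      else
        PySem.List.pyRepeat ['.'] (n - row - 1) ++ PySem.List.pyRepeat ['*'] (row - (n - row - 1) + 1) ++ PySem.List.pyRepeat ['.'] (n - 1 - row))
      = (PySem.List.pyRange 0 n 1).map (pvCellA n (PySem.Int.floordiv n 2) row) := by
  have hrange : PySem.List.pyRange 0 n 1 = (List.range (n - 0).toNat).map (fun k : Nat => 0 + (k : Int)) :=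
    PySem.List.pyRange_one 0 n
  set m := PySem.Int.floordiv n 2 with hm
  rw [hrange, List.map_map]
  simp only [Function.comp_def]
  by_cases hedge : row = 0 ∨ row = n - 1
  · rw [if_pos hedge]
    have hc : (fun k : Nat => pvCellA n m row (0 + (k : Int))) = fun _ => '*' := by
      funext k; simp [pvCellA, hedge]
    rw [hc, List.map_const', List.length_range, PySem.List.pyRepeat_singleton,
      show (n - 0).toNat = n.toNat by omega]
  · rw [if_neg hedge]
    rw [not_or] at hedge
    by_cases hup : row ≤ m
    · have h2 : row * 2 ≤ n := (PySem.Int.le_floordiv_iff_mul_le (by omega)).mp hup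
      rw [if_pos hup]
      have haI : ((row.toNat : Int)) = row := Int.toNat_of_nonneg h0
      have hbI : (((n - 2 * row).toNat : Int)) = n - 2 * row := Int.toNat_of_nonneg (by omega)
      have hc : (fun k : Nat => pvCellA n m row (0 + (k : Int)))
          = fun k : Nat => if row.toNat ≤ k ∧ k < row.toNat + (n - 2 * row).toNat then '*' else '.' := by
        funext k; simp only [pvCellA]
        split_ifs <;> first | rfl | omega
      rw [hc]
      have hlen : (n - 0).toNat = row.toNat + (n - 2 * row).toNat + row.toNat := by omega
      rw [hlen, pv_band, PySem.List.pyRepeat_singleton, PySem.List.pyRepeat_singleton,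
        PySem.List.pyRepeat_singleton,
        show (max 0 (n - row - 1 - row + 1)).toNat = (n - 2 * row).toNat by omega,
        show (n - 1 - (n - row - 1)).toNat = row.toNat by omega]
    · have h2 : n < row * 2 := (PySem.Int.floordiv_lt_iff_lt_mul (by omega)).mp (by omega)
      rw [if_neg hup]
      have hc : (fun k : Nat => pvCellA n m row (0 + (k : Int)))
          = fun k : Nat => if (n - row - 1).toNat ≤ k ∧ k < (n - row - 1).toNat + (row * 2 - n + 2).toNat then '*' else '.' := by
        have haI : (((n - row - 1).toNat : Int)) = n - row - 1 := Int.toNat_of_nonneg (by omega)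
        have hbI : (((row * 2 - n + 2).toNat : Int)) = row * 2 - n + 2 := Int.toNat_of_nonneg (by omega)
        funext k; simp only [pvCellA]
        split_ifs <;> first | rfl | omega
      rw [hc]
      have hlen : (n - 0).toNat = (n - row - 1).toNat + (row * 2 - n + 2).toNat + (n - row - 1).toNat := by omega
      rw [hlen, pv_band, PySem.List.pyRepeat_singleton, PySem.List.pyRepeat_singleton,
        PySem.List.pyRepeat_singleton,
        show (row - (n - row - 1) + 1).toNat = (row * 2 - n + 2).toNat by omega,
        show (n - 1 - row).toNat = (n - row - 1).toNat by omega]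

lemma pv_main (n : Int) : print_sands_clock n = print_sands_clock_alt n := by
  unfold print_sands_clock print_sands_clock_alt
  set m := PySem.Int.floordiv n 2 with hm
  congr 1
  -- A side: each inner loop appends one character per column
  have hstepA : ∀ row : Int,
      (fun (result : List Char) (col : Int) =>
        if row = 0 ∨ row = n - 1 then result ++ ['*']
        else if col ≥ row ∧ col < n - row ∧ row ≤ m then result ++ ['*']
        else if col ≥ n - row - 1 ∧ col ≤ row ∧ row > m then result ++ ['*']
        else result ++ ['.'])
      = fun result col => result ++ [pvCellA n m row col] := by
    intro row; funext res col; simp only [pvCellA]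
    split_ifs <;> rfl
  have hA : (fun (result : List Char) (row : Int) =>
        ((PySem.List.pyRange 0 n 1).foldl (fun (result : List Char) (col : Int) =>
          if row = 0 ∨ row = n - 1 then result ++ ['*']
          else if col ≥ row ∧ col < n - row ∧ row ≤ m then result ++ ['*']
          else if col ≥ n - row - 1 ∧ col ≤ row ∧ row > m then result ++ ['*']
          else result ++ ['.']) result) ++ ['\n'])
      = fun result row => result ++ ((PySem.List.pyRange 0 n 1).map (pvCellA n m row) ++ ['\n']) := by
    funext res row
    rw [hstepA row, pv_foldl_append_map, List.append_assoc]
  rw [hA, pv_foldl_append_flat (fun row => (PySem.List.pyRange 0 n 1).map (pvCellA n m row) ++ ['\n']), List.nil_append]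
  -- B side: the row loop collects one line per row
  have hstepB : (fun (lines : List (List Char)) (row : Int) =>
      if row = 0 ∨ row = n - 1 then
        lines ++ [PySem.List.pyRepeat ['*'] n]
      else if row ≤ m then
        lines ++ [PySem.List.pyRepeat ['.'] row ++ PySem.List.pyRepeat ['*'] (max 0 ((n - row - 1) - row + 1)) ++ PySem.List.pyRepeat ['.'] (n - 1 - (n - row - 1))]
      else
        lines ++ [PySem.List.pyRepeat ['.'] (n - row - 1) ++ PySem.List.pyRepeat ['*'] (row - (n - row - 1) + 1) ++ PySem.List.pyRepeat ['.'] (n - 1 - row)])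
      = fun lines row => lines ++
        [if row = 0 ∨ row = n - 1 then PySem.List.pyRepeat ['*'] n
         else if row ≤ m then
           PySem.List.pyRepeat ['.'] row ++ PySem.List.pyRepeat ['*'] (max 0 ((n - row - 1) - row + 1)) ++ PySem.List.pyRepeat ['.'] (n - 1 - (n - row - 1))
         else
           PySem.List.pyRepeat ['.'] (n - row - 1) ++ PySem.List.pyRepeat ['*'] (row - (n - row - 1) + 1) ++ PySem.List.pyRepeat ['.'] (n - 1 - row)] := by
    funext lines row; split_ifs <;> rfl
  rw [hstepB, pv_foldl_append_map (fun row : Int =>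
      if row = 0 ∨ row = n - 1 then PySem.List.pyRepeat ['*'] n
      else if row ≤ m then
        PySem.List.pyRepeat ['.'] row ++ PySem.List.pyRepeat ['*'] (max 0 ((n - row - 1) - row + 1)) ++ PySem.List.pyRepeat ['.'] (n - 1 - (n - row - 1))
      else
        PySem.List.pyRepeat ['.'] (n - row - 1) ++ PySem.List.pyRepeat ['*'] (row - (n - row - 1) + 1) ++ PySem.List.pyRepeat ['.'] (n - 1 - row))
    (PySem.List.pyRange 0 n 1) [], List.nil_append, List.map_map]
  rw [List.flatMap_def]
  congr 1
  apply List.map_congr_left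
  intro row hrow
  obtain ⟨h0, hn⟩ := (PySem.List.mem_pyRange_one).mp hrow
  simp only [Function.comp_def]
  rw [← pv_row n row (by omega) (by omega), hm]

theorem print_sands_clock_spec : Claim_equal_print_sands_clock := by
  intro n _
  exact pv_main n
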